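-- pv_equiv track=rewrite | github.com/meshal-1202/AI-classification | scripts/archive/compare_numeric_paths.py | conv2d_q8_same
-- ===== SOURCE A (Python) =====
-- def clamp_s16(v: int) -> int:
--     if v > 32767:
--         return 32767
--     if v < -32768:
--         return -32768
--     return v
--
-- def to_s32(v: int) -> int:
--     v &= 0xFFFFFFFF
--     return v - 0x100000000 if v & 0x80000000 else v
--
-- def conv2d_q8_same(input_arr, ch_in, h, w, kernel, bias, ch_out, emulate_s32: bool):
--     out = [0] * (ch_out * h * w)
--     max_abs_acc = 0
--     wraps = 0
--     for oc in range(ch_out):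
--         b = bias[oc]
--         for oh in range(h):
--             for ow in range(w):
--                 s = 0
--                 for ic in range(ch_in):
--                     for ky in range(3):
--                         in_y = oh + ky - 1
--                         if in_y < 0 or in_y >= h:
--                             continue
--                         for kx in range(3):
--                             in_x = ow + kx - 1
--                             if in_x < 0 or in_x >= w:
--                                 continue
--                             in_idx = ic * h * w + in_y * w + in_x
--                             k_idx = oc * ch_in * 9 + ic * 9 + ky * 3 + kx
--                             prod = input_arr[in_idx] * kernel[k_idx]
--                             if emulate_s32:
--                                 new_s = to_s32(s + prod)
--                                 if new_s != s + prod: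
--                                     wraps += 1
--                                 s = new_s
--                             else:
--                                 s += prod
--                 max_abs_acc = max(max_abs_acc, abs(s))
--                 if emulate_s32:
--                     s = to_s32((to_s32(s) >> 8) + b)
--                 else:
--                     s = (s >> 8) + b
--                 out[oc * h * w + oh * w + ow] = clamp_s16(s)
--     return out, max_abs_acc, wraps
-- ===== SOURCE B (Python) =====
-- def clamp_s16(v: int) -> int:
--     if v > 32767:
--         return 32767
--     if v < -32768:
--         return -32768
--     return v
--
-- def to_s32(v: int) -> int:
--     v &= 0xFFFFFFFF
--     return v - 0x100000000 if v & 0x80000000 else v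
--
-- def conv2d_q8_same(input_arr, ch_in, h, w, kernel, bias, ch_out, emulate_s32: bool):
--     out = [0] * (ch_out * h * w)
--     max_abs_acc = 0
--     wraps = 0
--     for oc in range(ch_out):
--         b = bias[oc]
--         for oh in range(h):
--             for ow in range(w):
--                 # ordered list of the product terms of this output pixel
--                 prods = [input_arr[ic * h * w + (oh + ky - 1) * w + (ow + kx - 1)]
--                          * kernel[oc * ch_in * 9 + ic * 9 + ky * 3 + kx]
--                          for ic in range(ch_in)
--                          for ky in range(3) if 0 <= oh + ky - 1 < h
--                          for kx in range(3) if 0 <= ow + kx - 1 < w]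
--                 total = sum(prods)
--                 if emulate_s32:
--                     # stepwise-wrapped accumulator == to_s32 of the exact sum;
--                     # a step wraps iff wrapped-prefix + term leaves the s32 range
--                     pref = 0
--                     for p in prods:
--                         if not (-2147483648 <= to_s32(pref) + p < 2147483648):
--                             wraps += 1
--                         pref += p
--                     s = to_s32(total)
--                 else:
--                     s = total
--                 max_abs_acc = max(max_abs_acc, abs(s))
--                 s = to_s32((s >> 8) + b) if emulate_s32 else (s >> 8) + b
--                 out[oc * h * w + oh * w + ow] = clamp_s16(s)
--     return out, max_abs_acc, wraps
-- ===== Notes on version B (the rewrite author's own statement) =====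
-- stated objective: alternative
-- what changed: Per output pixel B gathers the ordered product terms with a comprehension, obtains the wrapped accumulator as to_s32 of the exact sum (using that stepwise s32 wrapping is mod-2^32 reduction of the running total) and counts wraps by a range test on prefix sums, instead of A's interleaved stepwise to_s32 accumulation.
import Mathlib
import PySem

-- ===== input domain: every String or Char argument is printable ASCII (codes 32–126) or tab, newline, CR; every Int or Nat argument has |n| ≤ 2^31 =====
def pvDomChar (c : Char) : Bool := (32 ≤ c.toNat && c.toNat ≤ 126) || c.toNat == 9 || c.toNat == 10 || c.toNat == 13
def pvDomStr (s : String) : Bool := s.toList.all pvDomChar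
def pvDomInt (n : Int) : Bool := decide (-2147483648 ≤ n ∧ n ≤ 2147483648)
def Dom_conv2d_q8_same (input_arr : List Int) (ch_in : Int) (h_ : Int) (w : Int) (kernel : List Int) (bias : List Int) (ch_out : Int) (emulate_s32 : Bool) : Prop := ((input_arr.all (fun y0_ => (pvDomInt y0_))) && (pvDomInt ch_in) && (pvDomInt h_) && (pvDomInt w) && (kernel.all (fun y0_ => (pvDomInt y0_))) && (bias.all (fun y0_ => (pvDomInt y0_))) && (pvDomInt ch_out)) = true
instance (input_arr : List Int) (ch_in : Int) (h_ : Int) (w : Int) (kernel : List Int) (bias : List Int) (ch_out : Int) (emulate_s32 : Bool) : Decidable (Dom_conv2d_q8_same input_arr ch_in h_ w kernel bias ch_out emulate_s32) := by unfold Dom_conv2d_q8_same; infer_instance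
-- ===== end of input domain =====

-- B replaces A's stepwise-wrapped accumulation by to_s32 of the exact per-pixel sum plus a
-- prefix-sum range test for the wrap count (objective: alternative decomposition, same cost).

-- ===== PORT A =====
-- shared primitive helpers (ports of clamp_s16 / to_s32; '& 0xFFFFFFFF' is mod 2^32 and the
-- '& 0x80000000' sign test is '≥ 2^31' on that nonnegative residue — exact)
def clampS16 (v : Int) : Int :=
  if v > 32767 then 32767 else if v < -32768 then -32768 else v

def toS32 (v : Int) : Int :=
  if 2147483648 ≤ PySem.Int.mod v 4294967296 then PySem.Int.mod v 4294967296 - 4294967296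
  else PySem.Int.mod v 4294967296

-- A's innermost accumulation step (the emulate/else branch of A's kx body)
def stepA (em : Bool) (sw : Int × Int) (prod : Int) : Int × Int :=
  if em then
    let new_s := toS32 (sw.1 + prod)
    (new_s, if new_s ≠ sw.1 + prod then sw.2 + 1 else sw.2)
  else
    (sw.1 + prod, sw.2)

-- A's ic/ky/kx loops; list indexing via pyGet? with getD 0 (Pre_ excludes the IndexError inputs)
def innerA (input_arr kernel : List Int) (ch_in h_ w : Int) (em : Bool) (oc oh ow w0 : Int) : Int × Int :=
  (PySem.List.pyRange 0 ch_in 1).foldl (fun sw ic =>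
    (PySem.List.pyRange 0 3 1).foldl (fun sw ky =>
      let in_y := oh + ky - 1
      if in_y < 0 ∨ h_ ≤ in_y then sw
      else
        (PySem.List.pyRange 0 3 1).foldl (fun sw kx =>
          let in_x := ow + kx - 1
          if in_x < 0 ∨ w ≤ in_x then sw
          else
            let in_idx := ic * h_ * w + in_y * w + in_x
            let k_idx := oc * ch_in * 9 + ic * 9 + ky * 3 + kx
            let prod := (PySem.List.pyGet? input_arr in_idx).getD 0 *
                        (PySem.List.pyGet? kernel k_idx).getD 0
            stepA em sw prod) sw) sw) (0, w0)

-- '>> 8' on int is arithmetic shift = floor division by 256 (exact)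
def conv2d_q8_same (input_arr : List Int) (ch_in : Int) (h_ : Int) (w : Int) (kernel : List Int) (bias : List Int) (ch_out : Int) (emulate_s32 : Bool) : List Int × Int × Int :=
  let out0 : List Int := List.replicate (ch_out * h_ * w).toNat 0
  (PySem.List.pyRange 0 ch_out 1).foldl (fun st oc =>
    let b := (PySem.List.pyGet? bias oc).getD 0
    (PySem.List.pyRange 0 h_ 1).foldl (fun st oh =>
      (PySem.List.pyRange 0 w 1).foldl (fun st ow =>
        let sw := innerA input_arr kernel ch_in h_ w emulate_s32 oc oh ow st.2.2
        let maxacc := max st.2.1 |sw.1|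
        let s2 := if emulate_s32 then toS32 (PySem.Int.floordiv (toS32 sw.1) 256 + b)
                  else PySem.Int.floordiv sw.1 256 + b
        (st.1.set (oc * h_ * w + oh * w + ow).toNat (clampS16 s2), maxacc, sw.2)) st) st)
    (out0, 0, 0)

-- ===== PORT B =====
-- the comprehension building the ordered product terms of one output pixel
def prodsB (input_arr kernel : List Int) (ch_in h_ w : Int) (oc oh ow : Int) : List Int :=
  (PySem.List.pyRange 0 ch_in 1).flatMap (fun ic =>
    (PySem.List.pyRange 0 3 1).flatMap (fun ky =>
      if 0 ≤ oh + ky - 1 ∧ oh + ky - 1 < h_ then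
        (PySem.List.pyRange 0 3 1).flatMap (fun kx =>
          if 0 ≤ ow + kx - 1 ∧ ow + kx - 1 < w then
            [(PySem.List.pyGet? input_arr (ic * h_ * w + (oh + ky - 1) * w + (ow + kx - 1))).getD 0 *
             (PySem.List.pyGet? kernel (oc * ch_in * 9 + ic * 9 + ky * 3 + kx)).getD 0]
          else [])
      else []))

-- B's wrap-counting scan over prefix sums
def scanB (st : Int × Int) (p : Int) : Int × Int :=
  (st.1 + p,
   if ¬(-2147483648 ≤ toS32 st.1 + p ∧ toS32 st.1 + p < 2147483648) then st.2 + 1 else st.2)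

def conv2d_q8_same_alt (input_arr : List Int) (ch_in : Int) (h_ : Int) (w : Int) (kernel : List Int) (bias : List Int) (ch_out : Int) (emulate_s32 : Bool) : List Int × Int × Int :=
  let out0 : List Int := List.replicate (ch_out * h_ * w).toNat 0
  (PySem.List.pyRange 0 ch_out 1).foldl (fun st oc =>
    let b := (PySem.List.pyGet? bias oc).getD 0
    (PySem.List.pyRange 0 h_ 1).foldl (fun st oh =>
      (PySem.List.pyRange 0 w 1).foldl (fun st ow =>
        let prods := prodsB input_arr kernel ch_in h_ w oc oh ow
        let total := prods.sum
        let sw := if emulate_s32 then (toS32 total, (prods.foldl scanB (0, st.2.2)).2)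
                  else (total, st.2.2)
        let maxacc := max st.2.1 |sw.1|
        let s2 := if emulate_s32 then toS32 (PySem.Int.floordiv sw.1 256 + b)
                  else PySem.Int.floordiv sw.1 256 + b
        (st.1.set (oc * h_ * w + oh * w + ow).toNat (clampS16 s2), maxacc, sw.2)) st) st)
    (out0, 0, 0)

-- ===== PRECONDITION & SPEC =====
-- Pre_ is exactly the set where Python A returns: bias must cover ch_out, and when all loop
-- bounds are positive, input/kernel must contain the largest index the loops actually touch
-- (the ky=2 / kx=2 taps are only reached when h ≥ 2 / w ≥ 2).
def Pre_conv2d_q8_same (input_arr : List Int) (ch_in : Int) (h_ : Int) (w : Int) (kernel : List Int) (bias : List Int) (ch_out : Int) (emulate_s32 : Bool) : Prop :=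
  ch_out ≤ (bias.length : Int) ∧
  (0 < ch_out → 0 < ch_in → 0 < h_ → 0 < w →
    ch_in * h_ * w ≤ (input_arr.length : Int) ∧
    (ch_out - 1) * ch_in * 9 + (ch_in - 1) * 9 +
      (if 2 ≤ h_ then 2 else 1) * 3 + (if 2 ≤ w then 2 else 1) < (kernel.length : Int))
instance (input_arr : List Int) (ch_in : Int) (h_ : Int) (w : Int) (kernel : List Int) (bias : List Int) (ch_out : Int) (emulate_s32 : Bool) : Decidable (Pre_conv2d_q8_same input_arr ch_in h_ w kernel bias ch_out emulate_s32) := by unfold Pre_conv2d_q8_same; infer_instance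

def pvWitness_conv2d_q8_same : List Int × Int × Int × Int × List Int × List Int × Int × Bool :=
  ([1, -2, 3, 4], 1, 2, 2, [1, 0, -1, 2, 5, -3, 1, 1, 1], [7], 1, true)

def Spec_conv2d_q8_same (input_arr : List Int) (ch_in : Int) (h_ : Int) (w : Int) (kernel : List Int) (bias : List Int) (ch_out : Int) (emulate_s32 : Bool) (out : List Int × Int × Int) : Prop := out = conv2d_q8_same_alt input_arr ch_in h_ w kernel bias ch_out emulate_s32
instance (input_arr : List Int) (ch_in : Int) (h_ : Int) (w : Int) (kernel : List Int) (bias : List Int) (ch_out : Int) (emulate_s32 : Bool) (out : List Int × Int × Int) : Decidable (Spec_conv2d_q8_same input_arr ch_in h_ w kernel bias ch_out emulate_s32 out) := by unfold Spec_conv2d_q8_same; infer_instance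

-- ===== CLAIM (what is proved, stated in full; the proofs are below) =====
def Claim_equal_conv2d_q8_same : Prop := ∀ (input_arr : List Int) (ch_in : Int) (h_ : Int) (w : Int) (kernel : List Int) (bias : List Int) (ch_out : Int) (emulate_s32 : Bool), Dom_conv2d_q8_same input_arr ch_in h_ w kernel bias ch_out emulate_s32 → Pre_conv2d_q8_same input_arr ch_in h_ w kernel bias ch_out emulate_s32 → Spec_conv2d_q8_same input_arr ch_in h_ w kernel bias ch_out emulate_s32 (conv2d_q8_same input_arr ch_in h_ w kernel bias ch_out emulate_s32)

-- ===== LEMMAS AND PROOFS =====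

lemma toS32_emod (v : Int) : toS32 v =
    if 2147483648 ≤ v % 4294967296 then v % 4294967296 - 4294967296 else v % 4294967296 := by
  unfold toS32
  rw [PySem.Int.mod_eq_emod_of_pos (by norm_num : (0:Int) < 4294967296)]

lemma toS32_bounds (v : Int) : -2147483648 ≤ toS32 v ∧ toS32 v < 2147483648 := by
  rw [toS32_emod]; split <;> omega

lemma emod_toS32_add (a b : Int) : (toS32 a + b) % 4294967296 = (a + b) % 4294967296 := by
  rw [toS32_emod]; split <;> omega

lemma toS32_congr {a b : Int} (h : a % 4294967296 = b % 4294967296) : toS32 a = toS32 b := by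
  rw [toS32_emod, toS32_emod, h]

lemma toS32_add_left (a b : Int) : toS32 (toS32 a + b) = toS32 (a + b) :=
  toS32_congr (emod_toS32_add a b)

lemma toS32_eq_self_iff (x : Int) : toS32 x = x ↔ (-2147483648 ≤ x ∧ x < 2147483648) := by
  rw [toS32_emod]; split <;> omega

lemma toS32_idem (x : Int) : toS32 (toS32 x) = toS32 x :=
  (toS32_eq_self_iff (toS32 x)).mpr (toS32_bounds x)

lemma toS32_zero : toS32 0 = 0 := (toS32_eq_self_iff 0).mpr (by norm_num)

-- stepwise-wrapped fold = to_s32 of the exact sum, wraps = B's prefix-sum scan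
lemma foldl_stepA_true (P : List Int) (c w0 : Int) :
    P.foldl (stepA true) (toS32 c, w0) = (toS32 (c + P.sum), (P.foldl scanB (c, w0)).2) := by
  induction P generalizing c w0 with
  | nil => simp
  | cons p P ih =>
    have hstep : stepA true (toS32 c, w0) p =
        (toS32 (c + p), if ¬(-2147483648 ≤ toS32 c + p ∧ toS32 c + p < 2147483648)
                        then w0 + 1 else w0) := by
      have h1 : toS32 (toS32 c + p) = toS32 (c + p) := toS32_add_left c p
      have h2 : (toS32 (toS32 c + p) ≠ toS32 c + p) ↔
          ¬(-2147483648 ≤ toS32 c + p ∧ toS32 c + p < 2147483648) :=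
        not_congr (toS32_eq_self_iff (toS32 c + p))
      simp only [stepA]
      rw [if_congr h2 rfl rfl, h1]
      simp
    simp only [List.foldl_cons, hstep, scanB, List.sum_cons]
    rw [ih (c + p)]
    ring_nf

lemma foldl_stepA_false (P : List Int) (s0 w0 : Int) :
    P.foldl (stepA false) (s0, w0) = (s0 + P.sum, w0) := by
  induction P generalizing s0 with
  | nil => simp
  | cons p P ih => simp [stepA, ih, add_assoc]

lemma foldl_flatMap' {α : Type} (l : List α) (g : α → List Int)
    (f : (Int × Int) → Int → (Int × Int)) (init : Int × Int) :
    (l.flatMap g).foldl f init = l.foldl (fun acc x => (g x).foldl f acc) init := by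
  induction l generalizing init with
  | nil => rfl
  | cons x l ih => simp [List.foldl_append, ih]

-- A's nested ic/ky/kx loops fold A's step over exactly B's product list
lemma innerA_eq (input_arr kernel : List Int) (ch_in h_ w : Int) (em : Bool)
    (oc oh ow w0 : Int) :
    innerA input_arr kernel ch_in h_ w em oc oh ow w0 =
      (prodsB input_arr kernel ch_in h_ w oc oh ow).foldl (stepA em) (0, w0) := by
  unfold innerA prodsB
  rw [foldl_flatMap']
  apply PySem.List.foldl_congr_mem
  intro acc ic _
  rw [foldl_flatMap']
  apply PySem.List.foldl_congr_mem
  intro acc2 ky _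
  by_cases hy : 0 ≤ oh + ky - 1 ∧ oh + ky - 1 < h_
  · rw [if_pos hy, if_neg (by omega), foldl_flatMap']
    apply PySem.List.foldl_congr_mem
    intro acc3 kx _
    by_cases hx : 0 ≤ ow + kx - 1 ∧ ow + kx - 1 < w
    · rw [if_pos hx, if_neg (by omega)]
      simp
    · rw [if_neg hx, if_pos (by omega)]
      simp
  · rw [if_neg hy, if_pos (by omega)]
    simp

-- ===== VERDICT (by name: the statement is the Claim_ definition above) =====
theorem conv2d_q8_same_spec : Claim_equal_conv2d_q8_same := by
  intro input_arr ch_in h_ w kernel bias ch_out emulate_s32 _ _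
  unfold Spec_conv2d_q8_same conv2d_q8_same conv2d_q8_same_alt
  apply PySem.List.foldl_congr_mem
  intro st oc _
  apply PySem.List.foldl_congr_mem
  intro st2 oh _
  apply PySem.List.foldl_congr_mem
  intro st3 ow _
  simp only [innerA_eq]
  cases emulate_s32 with
  | false =>
    simp [foldl_stepA_false]
  | true =>
    have h0 : ((0 : Int), st3.2.2) = (toS32 0, st3.2.2) := by rw [toS32_zero]
    rw [h0, foldl_stepA_true, toS32_zero]
    simp [toS32_idem]
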